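-- pv_equiv track=rewrite | github.com/axelFrau/Atelier_prog_4 | ATELIER 4/Atelier4_Chaines_de_caractère.py | outputStr
-- ===== SOURCE A (Python) =====
-- def outputStr(mot : str, lpos:list)->str:
--     """Prend un mot et ajoute à 'str_output' aux emplacements indiqué dans 'l_pos' le '-' par la lettre dans le mot"""
--     str_output = ''
--     i = 0
--     while i < len(mot) :
--         if i in lpos :
--             str_output += mot[i]
--         else :
--             str_output += '-'
--         i += 1
--     return str_output
-- ===== SOURCE B (Python) =====
-- def outputStr(mot: str, lpos: list) -> str:
--     """Scatter: prebuild a fully masked buffer, then reveal the letters at the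
--     in-range positions listed in lpos."""
--     res = ['-'] * len(mot)
--     for p in lpos:
--         if 0 <= p < len(mot):
--             res[p] = mot[p]
--     return ''.join(res)
-- ===== Notes on version B (the rewrite author's own statement) =====
-- stated objective: faster
-- what changed: B prebuilds a fully masked character buffer and scatters the letters at the listed in-range positions, instead of scanning every index of the word and doing a linear membership test in lpos for each.
import Mathlib
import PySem

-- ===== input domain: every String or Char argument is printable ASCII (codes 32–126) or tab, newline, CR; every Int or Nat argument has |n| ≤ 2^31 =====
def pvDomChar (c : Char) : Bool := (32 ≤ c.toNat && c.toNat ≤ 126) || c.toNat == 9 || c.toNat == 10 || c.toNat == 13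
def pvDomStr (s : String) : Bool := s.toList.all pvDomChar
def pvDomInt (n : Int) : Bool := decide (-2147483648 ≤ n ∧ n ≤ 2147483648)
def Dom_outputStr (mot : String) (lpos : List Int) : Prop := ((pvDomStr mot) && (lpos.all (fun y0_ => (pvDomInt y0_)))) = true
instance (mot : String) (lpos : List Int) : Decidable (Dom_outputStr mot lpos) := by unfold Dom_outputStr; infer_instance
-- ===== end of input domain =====

-- ===== PORT A =====
-- B scatters letters over a prebuilt masked buffer instead of A's per-index membership scan.
def outputStr (mot : String) (lpos : List Int) : String :=
  String.ofList ((List.range mot.toList.length).foldl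
    (fun (acc : List Char) (i : Nat) => acc ++ [if lpos.contains (i : Int) then mot.toList[i]! else '-']) [])

-- ===== PORT B =====
def outputStr_alt (mot : String) (lpos : List Int) : String :=
  String.ofList (lpos.foldl
    (fun (res : List Char) (p : Int) =>
      if 0 ≤ p ∧ p < (mot.toList.length : Int) then res.set p.toNat (mot.toList[p.toNat]!) else res)
    (List.replicate mot.toList.length '-'))

-- ===== PRECONDITION & SPEC =====
def Spec_outputStr (mot : String) (lpos : List Int) (out : String) : Prop := out = outputStr_alt mot lpos
instance (mot : String) (lpos : List Int) (out : String) : Decidable (Spec_outputStr mot lpos out) := by unfold Spec_outputStr; infer_instance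

-- ===== CLAIM (what is proved, stated in full; the proofs are below) =====
def Claim_equal_outputStr : Prop := ∀ (mot : String) (lpos : List Int), Dom_outputStr mot lpos → Spec_outputStr mot lpos (outputStr mot lpos)

-- ===== LEMMAS AND PROOFS =====

theorem pv_foldl_app (f : Nat → Char) :
    ∀ (l : List Nat) (acc : List Char),
      l.foldl (fun a i => a ++ [f i]) acc = acc ++ l.map f := by
  intro l
  induction l with
  | nil => simp
  | cons x xs ih => intro acc; simp [List.foldl, ih]

theorem pv_fold_length (m : List Char) :
    ∀ (lpos : List Int) (b : List Char),
      (lpos.foldl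
        (fun (res : List Char) (p : Int) =>
          if 0 ≤ p ∧ p < (m.length : Int) then res.set p.toNat (m[p.toNat]!) else res)
        b).length = b.length := by
  intro lpos
  induction lpos with
  | nil => simp
  | cons p ps ih =>
    intro b
    simp only [List.foldl]
    split
    · rw [ih]; simp
    · exact ih b

theorem pv_fold_getD (m : List Char) :
    ∀ (lpos : List Int) (b : List Char) (i : Nat), b.length = m.length → i < m.length →
      (lpos.foldl
        (fun (res : List Char) (p : Int) =>
          if 0 ≤ p ∧ p < (m.length : Int) then res.set p.toNat (m[p.toNat]!) else res)
        b).getD i ' ' =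
      if lpos.contains (i : Int) then m[i]! else b.getD i ' ' := by
  intro lpos
  induction lpos with
  | nil => intro b i _ _; simp
  | cons p ps ih =>
    intro b i hb hi
    simp only [List.foldl, List.contains_cons]
    by_cases hg : 0 ≤ p ∧ p < (m.length : Int)
    · rw [if_pos hg]
      by_cases hpi : p = (i : Int)
      · have hpn : p.toNat = i := by omega
        rw [ih _ i (by simp [hb]) hi]
        have hset : (b.set p.toNat (m[p.toNat]!)).getD i ' ' = m[i]! := by
          subst hpn
          simp [List.getD, hb, hi]
        rw [hset]
        have htrue : ((i : Int) == p) = true := by simp [hpi]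
        simp [htrue]
      · have hpn : p.toNat ≠ i := by omega
        have hsetne : (b.set p.toNat (m[p.toNat]!)).getD i ' ' = b.getD i ' ' := by
          simp [List.getD, List.getElem?_set_ne, hpn]
        rw [ih _ i (by simp [hb]) hi, hsetne]
        have hne : ((i : Int) == p) = false := by simp; omega
        simp [hne]
    · rw [if_neg hg]
      have hne : ((i : Int) == p) = false := by simp; omega
      rw [ih _ i hb hi]
      simp [hne]

theorem pv_lists_eq (mot : String) (lpos : List Int) :
    ((List.range mot.toList.length).foldl
      (fun (acc : List Char) (i : Nat) => acc ++ [if lpos.contains (i : Int) then mot.toList[i]! else '-']) []) =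
    (lpos.foldl
      (fun (res : List Char) (p : Int) =>
        if 0 ≤ p ∧ p < (mot.toList.length : Int) then res.set p.toNat (mot.toList[p.toNat]!) else res)
      (List.replicate mot.toList.length '-')) := by
  set m := mot.toList with hm
  rw [pv_foldl_app (fun i => if lpos.contains (i : Int) then m[i]! else '-')]
  apply List.ext_getElem
  · simp only [List.nil_append, List.length_map, List.length_range,
      pv_fold_length, List.length_replicate]
  · intro i h1 h2
    have hi : i < m.length := by simpa using h1
    have hgd := pv_fold_getD m lpos (List.replicate m.length '-') i (by simp) hi
    simp only [List.nil_append, List.getElem_map, List.getElem_range]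
    rw [← List.getD_eq_getElem _ ' ' h2, hgd]
    congr 1
    simp [List.getD, hi]

-- ===== VERDICT (by name: the statement is the Claim_ definition above) =====
theorem outputStr_spec : Claim_equal_outputStr := by
  intro mot lpos _
  unfold Spec_outputStr outputStr outputStr_alt
  rw [pv_lists_eq]
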